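-- pv_equiv track=rewrite | github.com/Mingkai2233/origin | normalPractice/basic/forceRecursion/stackReverse.py | getTheBottom
-- ===== SOURCE A (Python) =====
-- def getTheBottom(stack: list):
--     tmp = stack.pop()
--     if not len(stack) > 0:
--         return tmp
--     else:
--         last = getTheBottom(stack)
--         stack.append(tmp)
--         return last
-- ===== SOURCE B (Python) =====
-- def getTheBottom(stack: list):
--     return stack.pop(0)
-- ===== Notes on version B (the rewrite author's own statement) =====
-- stated objective: idiomatic
-- what changed: Replaces the recursive pop-all/reappend disassembly with a single in-place stack.pop(0) that removes and returns the bottom element directly.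
import Mathlib
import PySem

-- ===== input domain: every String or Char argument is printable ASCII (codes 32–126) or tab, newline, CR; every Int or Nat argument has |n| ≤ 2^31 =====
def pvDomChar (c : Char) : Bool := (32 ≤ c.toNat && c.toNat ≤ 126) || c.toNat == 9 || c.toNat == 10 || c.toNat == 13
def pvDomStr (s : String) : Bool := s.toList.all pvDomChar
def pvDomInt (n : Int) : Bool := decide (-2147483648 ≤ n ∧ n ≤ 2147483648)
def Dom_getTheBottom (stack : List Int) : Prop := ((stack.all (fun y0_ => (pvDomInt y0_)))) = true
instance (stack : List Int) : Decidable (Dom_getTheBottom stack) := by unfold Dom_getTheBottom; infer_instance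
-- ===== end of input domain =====

-- B replaces A's recursive pop-everything/reappend with a single in-place stack.pop(0) (idiomatic);
-- both mutate the list identically (bottom element removed); equivalence proved on the RETURN value.

-- ===== PORT A =====
-- tmp = stack.pop(); if stack empty return tmp; else recurse on the remaining stack
-- (the append of tmp only restores the mutable list and does not affect the return value).
def getTheBottom (stack : List Int) : Int :=
  if hs : stack = [] then 0  -- unreachable under Pre_: Python's pop() raises IndexError here
  else
    let tmp := stack.getLast hs
    let rest := stack.dropLast
    if rest.length > 0 then getTheBottom rest else tmp
termination_by stack.length
decreasing_by
  simp [List.length_dropLast]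
  exact List.length_pos_iff.mpr hs

-- ===== PORT B =====
-- return stack.pop(0): removes and returns the first element; IndexError on empty (outside Pre_).
def getTheBottom_alt (stack : List Int) : Int :=
  match stack with
  | [] => 0  -- unreachable under Pre_
  | x :: _ => x

-- ===== PRECONDITION & SPEC =====
-- Pre_ excludes the empty list, on which both A and B raise IndexError.
def Pre_getTheBottom (stack : List Int) : Prop := stack ≠ []
instance (stack : List Int) : Decidable (Pre_getTheBottom stack) := by unfold Pre_getTheBottom; infer_instance
def pvWitness_getTheBottom : List Int := [3, 1, 2]

def Spec_getTheBottom (stack : List Int) (out : Int) : Prop := out = getTheBottom_alt stack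
instance (stack : List Int) (out : Int) : Decidable (Spec_getTheBottom stack out) := by unfold Spec_getTheBottom; infer_instance

-- ===== CLAIM =====
def Claim_equal_getTheBottom : Prop := ∀ (stack : List Int), Dom_getTheBottom stack → Pre_getTheBottom stack → Spec_getTheBottom stack (getTheBottom stack)

-- ===== LEMMAS AND PROOFS =====
theorem getTheBottom_eq_head (stack : List Int) (hs : stack ≠ []) :
    getTheBottom stack = stack.head hs := by
  induction stack using List.reverseRecOn with
  | nil => exact absurd rfl hs
  | append_singleton xs x ih =>
    rw [getTheBottom]
    simp only [dif_neg hs]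
    by_cases hx : xs = []
    · subst hx; simp
    · have hlen : (xs ++ [x]).dropLast.length > 0 := by
        simp [List.length_pos_iff, hx]
      rw [if_pos hlen]
      have hdl : (xs ++ [x]).dropLast = xs := by simp
      calc getTheBottom (xs ++ [x]).dropLast
          = getTheBottom xs := by rw [hdl]
        _ = xs.head hx := ih hx
        _ = (xs ++ [x]).head hs := by
            cases xs with
            | nil => exact absurd rfl hx
            | cons a t => simp

-- ===== VERDICT =====
theorem getTheBottom_spec : Claim_equal_getTheBottom := by
  intro stack _ hpre
  unfold Spec_getTheBottom
  rw [getTheBottom_eq_head stack hpre]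
  cases stack with
  | nil => exact absurd rfl hpre
  | cons x t => rfl
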